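-- pv_equiv track=rewrite | github.com/gksagast/Signal_analysis | Confusion_matrix_average_accuracies.py | grounded
-- ===== SOURCE A (Python) =====
-- def grounded(data):
--     ground_truth = []
--     current = 0
--     for i in range(len(data)):
--         if i%123 == 0:
--             current = current+1
--             ground_truth.append(current)
--         else:
--             ground_truth.append(current)
--     return ground_truth
-- ===== SOURCE B (Python) =====
-- def grounded(data):
--     n = len(data)
--     result = []
--     block = 0
--     while len(result) < n:
--         block += 1
--         result.extend([block] * min(123, n - len(result)))
--     return result
-- ===== Notes on version B (the rewrite author's own statement) =====
-- stated objective: alternative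
-- what changed: Builds the output as run-length chunks (extend a list of up to 123 equal labels per outer iteration) instead of appending one label per index with an if-guarded counter.
import Mathlib
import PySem

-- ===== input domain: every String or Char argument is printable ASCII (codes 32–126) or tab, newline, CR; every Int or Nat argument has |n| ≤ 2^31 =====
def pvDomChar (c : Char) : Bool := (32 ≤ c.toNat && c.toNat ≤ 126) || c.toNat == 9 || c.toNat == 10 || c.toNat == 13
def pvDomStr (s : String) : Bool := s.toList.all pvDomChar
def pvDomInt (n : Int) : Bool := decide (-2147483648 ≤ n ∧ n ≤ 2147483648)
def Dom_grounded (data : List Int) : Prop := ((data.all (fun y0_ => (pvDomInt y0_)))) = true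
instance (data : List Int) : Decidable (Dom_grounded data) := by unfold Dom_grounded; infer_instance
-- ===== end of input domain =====

-- B builds the output as run-length chunks of up to 123 equal labels instead of an
-- if-guarded per-index accumulator; objective: alternative decomposition, same cost.

-- ===== PORT A =====
def grounded (data : List Int) : List Int :=
  ((PySem.List.pyRange 0 (data.length : Int) 1).foldl
    (fun (st : Int × List Int) i =>
      if i % 123 == 0 then (st.1 + 1, st.2 ++ [st.1 + 1])
      else (st.1, st.2 ++ [st.1]))
    (0, [])).2

-- ===== PORT B =====
-- the while loop of Source B: state = (remaining count to fill, current block label)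
def fillBlocks (rem : Nat) (block : Int) : List Int :=
  if rem = 0 then []
  else List.replicate (min 123 rem) (block + 1) ++ fillBlocks (rem - min 123 rem) (block + 1)
termination_by rem
decreasing_by omega

def grounded_alt (data : List Int) : List Int := fillBlocks data.length 0

-- ===== PRECONDITION & SPEC =====
def Spec_grounded (data : List Int) (out : List Int) : Prop := out = grounded_alt data
instance (data : List Int) (out : List Int) : Decidable (Spec_grounded data out) := by unfold Spec_grounded; infer_instance

-- ===== CLAIM (what is proved, stated in full; the proofs are below) =====
def Claim_equal_grounded : Prop := ∀ (data : List Int), Dom_grounded data → Spec_grounded data (grounded data)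

-- ===== LEMMAS AND PROOFS =====

-- closed form shared by both proofs: position i gets label b + i/123 + 1
def cf (n : Nat) (b : Int) : List Int :=
  (List.range n).map (fun i => b + ((i / 123 : Nat) : Int) + 1)

theorem cf_small (rem : Nat) (b : Int) (h : rem ≤ 123) :
    cf rem b = List.replicate rem (b + 1) := by
  rw [cf, List.eq_replicate_iff]
  refine ⟨by simp, ?_⟩
  intro x hx
  simp only [List.mem_map, List.mem_range] at hx
  obtain ⟨i, hi, rfl⟩ := hx
  have : i / 123 = 0 := by omega
  rw [this]; simp

theorem cf_split (rem : Nat) (b : Int) (h : 123 ≤ rem) :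
    cf rem b = List.replicate 123 (b + 1) ++ cf (rem - 123) (b + 1) := by
  have h1 : rem = 123 + (rem - 123) := by omega
  rw [cf]
  conv_lhs => rw [h1]
  rw [List.range_add, List.map_append]
  congr 1
  · rw [List.eq_replicate_iff]
    refine ⟨by simp, ?_⟩
    intro x hx
    simp only [List.mem_map, List.mem_range] at hx
    obtain ⟨i, hi, rfl⟩ := hx
    have : i / 123 = 0 := by omega
    rw [this]; simp
  · rw [cf, List.map_map]
    apply List.map_congr_left
    intro i _
    simp only [Function.comp]
    have : (123 + i) / 123 = i / 123 + 1 := by omega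
    rw [this]
    push_cast
    ring

theorem fillBlocks_eq_cf : ∀ (rem : Nat) (b : Int), fillBlocks rem b = cf rem b := by
  intro rem
  induction rem using Nat.strong_induction_on with
  | _ rem ih =>
    intro b
    rw [fillBlocks]
    by_cases h0 : rem = 0
    · simp [h0, cf]
    · simp only [h0, if_false]
      rw [ih (rem - min 123 rem) (by omega)]
      by_cases hle : rem ≤ 123
      · have hmin : min 123 rem = rem := by omega
        rw [hmin, Nat.sub_self, cf_small rem b hle]
        simp [cf]
      · have hmin : min 123 rem = 123 := by omega
        rw [hmin, cf_split rem b (by omega)]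

-- A's loop invariant: after processing indices 0..n-1, the state is (⌈n/123⌉, cf n 0)
theorem groundedLoop_eq_cf : ∀ (n : Nat),
    ((List.range n).map (fun k : Nat => (0 : Int) + (k : Int))).foldl
      (fun (st : Int × List Int) i =>
        if i % 123 == 0 then (st.1 + 1, st.2 ++ [st.1 + 1])
        else (st.1, st.2 ++ [st.1]))
      (0, []) = ((((n + 122) / 123 : Nat) : Int), cf n 0) := by
  intro n
  induction n with
  | zero => simp [cf]
  | succ n ih =>
    rw [List.range_succ, List.map_append, List.foldl_append, ih]
    simp only [List.map_cons, List.map_nil, List.foldl_cons, List.foldl_nil, zero_add]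
    have hmod : ((n : Int) % 123 == 0) = (n % 123 == 0) := by
      rw [show ((n : Int) % 123) = ((n % 123 : Nat) : Int) by push_cast; ring]
      by_cases h : n % 123 = 0 <;> simp [h] <;> omega
    rw [hmod]
    by_cases h : n % 123 = 0
    · simp only [h, beq_self_eq_true, if_true, cf, List.range_succ, List.map_append,
        List.map_cons, List.map_nil, Prod.mk.injEq, List.append_cancel_left_eq,
        List.cons.injEq, and_true]
      refine ⟨by omega, by omega⟩
    · have hb : (n % 123 == 0) = false := by simp [h]
      simp only [hb, Bool.false_eq_true, if_false, cf, List.range_succ, List.map_append,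
        List.map_cons, List.map_nil, Prod.mk.injEq, List.append_cancel_left_eq,
        List.cons.injEq, and_true]
      refine ⟨by omega, by omega⟩

theorem grounded_eq_cf (data : List Int) : grounded data = cf data.length 0 := by
  unfold grounded
  rw [PySem.List.pyRange_one]
  have h : ((data.length : Int) - 0).toNat = data.length := by omega
  rw [h, groundedLoop_eq_cf]

-- ===== VERDICT (by name: the statement is the Claim_ definition above) =====
theorem grounded_spec : Claim_equal_grounded := by
  intro data _
  unfold Spec_grounded grounded_alt
  rw [grounded_eq_cf, fillBlocks_eq_cf]
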